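-- pv_equiv track=rewrite | github.com/GU-Student-Projects/CPSC353 | Homework 2/utils/cipher_text_finder.py | process_word_batch
-- ===== SOURCE A (Python) =====
-- from typing import List, Dict, Set, Tuple, Optional
--
-- ALPHABET = "ABCDEFGHIJKLMNOPQRSTUVWXYZ "
--
-- CHAR_TO_NUM = {char: i for i, char in enumerate(ALPHABET)}
--
-- NUM_TO_CHAR = list(ALPHABET)
--
-- def caesar_cipher(message: str, key: str) -> str:
--     shift = CHAR_TO_NUM[key]
--     encrypted_message = ""
--
--     for char in message:
--         if char not in CHAR_TO_NUM:
--             raise ValueError(f"Character '{char}' in message is not in the alphabet")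
--
--         char_num = CHAR_TO_NUM[char]
--         encrypted_num = (char_num + shift) % 27
--         encrypted_message += NUM_TO_CHAR[encrypted_num]
--
--     return encrypted_message
--
-- def process_word_batch(word_batch: List[str]) -> Dict[str, List[str]]:
--     result = {}
--     for word in word_batch:
--         ciphertexts = []
--         for key in ALPHABET:
--             ct = caesar_cipher(word, key)
--             ciphertexts.append(ct)
--         result[word] = ciphertexts
--     return result
-- ===== SOURCE B (Python) =====
-- ALPHABET = "ABCDEFGHIJKLMNOPQRSTUVWXYZ "
--
-- NUM_TO_CHAR = list(ALPHABET)
--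
-- def process_word_batch(word_batch):
--     result = {}
--     for word in word_batch:
--         nums = []
--         for ch in word:
--             if ch not in ALPHABET:
--                 raise ValueError(f"Character '{ch}' in message is not in the alphabet")
--             nums.append(ALPHABET.index(ch))
--         result[word] = [''.join(NUM_TO_CHAR[(n + shift) % 27] for n in nums)
--                         for shift in range(27)]
--     return result
-- ===== Notes on version B (the rewrite author's own statement) =====
-- stated objective: simpler
-- what changed: B drops the caesar_cipher helper and the CHAR_TO_NUM dict entirely: it validates and indexes each word once via ALPHABET.index, then builds the 27 ciphertexts table-driven over range(27), instead of 27 independent helper calls that each re-scan and re-validate the word through the dict.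
import Mathlib
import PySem

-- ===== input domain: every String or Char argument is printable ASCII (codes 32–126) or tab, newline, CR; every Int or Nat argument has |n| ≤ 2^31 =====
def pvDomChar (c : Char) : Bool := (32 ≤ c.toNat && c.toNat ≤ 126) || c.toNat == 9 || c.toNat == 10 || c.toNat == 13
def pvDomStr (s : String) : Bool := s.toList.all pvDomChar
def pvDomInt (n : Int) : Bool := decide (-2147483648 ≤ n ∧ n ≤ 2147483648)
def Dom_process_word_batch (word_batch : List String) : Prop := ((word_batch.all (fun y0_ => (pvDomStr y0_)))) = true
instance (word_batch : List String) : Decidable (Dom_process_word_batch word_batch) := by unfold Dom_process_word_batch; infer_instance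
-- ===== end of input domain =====

-- B drops the caesar_cipher helper and the char→num dict: one validation/index pass per word,
-- then the 27 ciphertexts are built table-driven over range(27). Objective: simpler.

-- ===== PORT A =====
def pvALPHABET : List Char :=
  ['A', 'B', 'C', 'D', 'E', 'F', 'G', 'H', 'I', 'J', 'K', 'L', 'M', 'N', 'O', 'P', 'Q', 'R', 'S', 'T', 'U', 'V', 'W', 'X', 'Y', 'Z', ' ']

def pvCHAR_TO_NUM : PySem.Dict Char Int :=
  (PySem.List.enumerate pvALPHABET).foldl (fun d p => d.insert p.2 (p.1 : Int)) PySem.Dict.empty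

def pvNUM_TO_CHAR : List Char := pvALPHABET

-- caesar_cipher: returns none where the Python raises (KeyError on key / ValueError on message char)
def caesar_cipher (message : String) (key : Char) : Option String :=
  match pvCHAR_TO_NUM.get? key with
  | none => none
  | some shift =>
    message.toList.foldl
      (fun acc c =>
        match acc with
        | none => none
        | some em =>
          match pvCHAR_TO_NUM.get? c with
          | none => none
          | some n =>
            match PySem.List.pyGet? pvNUM_TO_CHAR (PySem.Int.mod (n + shift) 27) with
            | none => none
            | some ch => some (em ++ String.ofList [ch]))
      (some "")

def process_word_batch (word_batch : List String) : List (String × List String) :=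
  (word_batch.foldl
    (fun result word =>
      match result with
      | none => none
      | some d =>
        match pvALPHABET.foldl
          (fun cts key =>
            match cts with
            | none => none
            | some l =>
              match caesar_cipher word key with
              | none => none
              | some ct => some (l ++ [ct]))
          (some []) with
        | none => none
        | some ciphertexts => some (d.insert word ciphertexts))
    (some (PySem.Dict.empty : PySem.Dict String (List String)))).map PySem.Dict.items |>.getD []

-- ===== PORT B =====
-- nums = [ALPHABET.index(ch) for ch in word], none where the Python raises ValueError
def pvAltNums (word : String) : Option (List Int) :=
  word.toList.foldl
    (fun acc ch =>
      match acc with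
      | none => none
      | some ns =>
        match PySem.List.index? pvALPHABET ch with
        | none => none
        | some i => some (ns ++ [(i : Int)]))
    (some [])

-- ''.join(NUM_TO_CHAR[(n + shift) % 27] for n in nums); the index is provably in range (mod 27)
def pvAltShift (nums : List Int) (shift : Int) : String :=
  String.ofList (nums.map (fun n =>
    (PySem.List.pyGet? pvNUM_TO_CHAR (PySem.Int.mod (n + shift) 27)).getD ' '))

def process_word_batch_alt (word_batch : List String) : List (String × List String) :=
  (word_batch.foldl
    (fun result word =>
      match result with
      | none => none
      | some d =>
        match pvAltNums word with
        | none => none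
        | some nums =>
          some (d.insert word ((PySem.List.pyRange 0 27 1).map (fun shift => pvAltShift nums shift))))
    (some (PySem.Dict.empty : PySem.Dict String (List String)))).map PySem.Dict.items |>.getD []

-- ===== PRECONDITION & SPEC =====
-- Pre_ excludes exactly the inputs on which A raises ValueError: a word containing a
-- character outside the 27-letter alphabet.
def Pre_process_word_batch (word_batch : List String) : Prop :=
  ∀ w ∈ word_batch, ∀ c ∈ w.toList, c ∈ pvALPHABET
instance (word_batch : List String) : Decidable (Pre_process_word_batch word_batch) := by
  unfold Pre_process_word_batch; infer_instance
def pvWitness_process_word_batch : List String := []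
def Spec_process_word_batch (word_batch : List String) (out : List (String × List String)) : Prop := out = process_word_batch_alt word_batch
instance (word_batch : List String) (out : List (String × List String)) : Decidable (Spec_process_word_batch word_batch out) := by unfold Spec_process_word_batch; infer_instance

-- ===== CLAIM (what is proved, stated in full; the proofs are below) =====
def Claim_equal_process_word_batch : Prop := ∀ (word_batch : List String), Dom_process_word_batch word_batch → Pre_process_word_batch word_batch → Spec_process_word_batch word_batch (process_word_batch word_batch)

-- ===== LEMMAS AND PROOFS =====

-- the per-char index used in the proofs
def pvIdx (c : Char) : Int := ((PySem.List.index? pvALPHABET c).getD 0 : Nat)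

-- the per-shift ciphertext of a word, as a function of the shift
def pvF (word : String) (s : Int) : String :=
  String.ofList (word.toList.map (fun c =>
    (PySem.List.pyGet? pvNUM_TO_CHAR (PySem.Int.mod (pvIdx c + s) 27)).getD ' '))

set_option maxRecDepth 100000 in
lemma lookup_map :
    pvALPHABET.map (fun c => pvCHAR_TO_NUM.get? c) = pvALPHABET.map (fun c => some (pvIdx c)) := by
  decide

lemma lookup_mem : ∀ c ∈ pvALPHABET, pvCHAR_TO_NUM.get? c = some (pvIdx c) :=
  List.map_eq_map_iff.1 lookup_map

lemma pyGet_num_to_char_isSome (n : Int) :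
    ∃ ch, PySem.List.pyGet? pvNUM_TO_CHAR (PySem.Int.mod n 27) = some ch := by
  have h0 : (0:Int) < 27 := by norm_num
  have h1 := PySem.Int.mod_nonneg n h0
  have h2 := PySem.Int.mod_lt n h0
  have hlen : (pvNUM_TO_CHAR.length : Int) = 27 := by decide
  cases hx : PySem.List.pyGet? pvNUM_TO_CHAR (PySem.Int.mod n 27) with
  | some ch => exact ⟨ch, rfl⟩
  | none =>
    exfalso
    rw [PySem.List.pyGet?_eq_none_iff] at hx
    apply hx
    simp only [PySem.Raise.InRange]
    omega

lemma nums_aux (l : List Char) (acc : List Int) (h : ∀ c ∈ l, c ∈ pvALPHABET) :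
    l.foldl
      (fun acc ch =>
        match acc with
        | none => none
        | some ns =>
          match PySem.List.index? pvALPHABET ch with
          | none => none
          | some i => some (ns ++ [(i : Int)]))
      (some acc) = some (acc ++ l.map pvIdx) := by
  induction l generalizing acc with
  | nil => simp
  | cons c t ih =>
    have hc : c ∈ pvALPHABET := h c (by simp)
    obtain ⟨i, hi⟩ := (PySem.List.index?_isSome_iff (xs := pvALPHABET) (v := c)).2 hc |> Option.isSome_iff_exists.1
    have hi' : List.idxOf? c pvALPHABET = some i := by
      rw [← PySem.List.index?_eq_idxOf?]; exact hi
    have hidx : pvIdx c = (i : Int) := by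
      simp [pvIdx, hi']
    simp only [List.foldl_cons, hi]
    rw [ih (acc ++ [(i : Int)]) (fun x hx => h x (by simp [hx]))]
    simp [hidx]

lemma alt_nums_eq (word : String) (h : ∀ c ∈ word.toList, c ∈ pvALPHABET) :
    pvAltNums word = some (word.toList.map pvIdx) := by
  unfold pvAltNums
  simpa using nums_aux word.toList [] h

lemma caesar_aux (l : List Char) (shift : Int) (acc : List Char)
    (h : ∀ c ∈ l, c ∈ pvALPHABET) :
    l.foldl
      (fun acc c =>
        match acc with
        | none => none
        | some em =>
          match pvCHAR_TO_NUM.get? c with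
          | none => none
          | some n =>
            match PySem.List.pyGet? pvNUM_TO_CHAR (PySem.Int.mod (n + shift) 27) with
            | none => none
            | some ch => some (em ++ String.ofList [ch]))
      (some (String.ofList acc)) =
      some (String.ofList (acc ++ l.map (fun c =>
        (PySem.List.pyGet? pvNUM_TO_CHAR (PySem.Int.mod (pvIdx c + shift) 27)).getD ' '))) := by
  induction l generalizing acc with
  | nil => simp
  | cons c t ih =>
    have hc : c ∈ pvALPHABET := h c (by simp)
    obtain ⟨ch, hch⟩ := pyGet_num_to_char_isSome (pvIdx c + shift)
    have happ : String.ofList acc ++ String.ofList [ch] = String.ofList (acc ++ [ch]) :=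
      Eq.symm String.ofList_append
    simp only [List.foldl_cons, lookup_mem c hc, hch, happ]
    rw [ih (acc ++ [ch]) (fun x hx => h x (by simp [hx]))]
    simp only [List.map_cons, hch, Option.getD_some, List.append_assoc, List.singleton_append]

lemma caesar_eq (word : String) (key : Char) (hk : key ∈ pvALPHABET)
    (h : ∀ c ∈ word.toList, c ∈ pvALPHABET) :
    caesar_cipher word key = some (pvF word ((pvCHAR_TO_NUM.get? key).getD 0)) := by
  unfold caesar_cipher
  rw [lookup_mem key hk]
  have := caesar_aux word.toList ((pvCHAR_TO_NUM.get? key).getD 0) [] h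
  rw [lookup_mem key hk] at this
  simp only [Option.getD_some] at this
  simpa [pvF] using this

set_option maxRecDepth 100000 in
lemma shifts_eq :
    pvALPHABET.map (fun k => (pvCHAR_TO_NUM.get? k).getD 0) = PySem.List.pyRange 0 27 1 := by
  decide

lemma alt_shift_eq (word : String) (s : Int) :
    pvAltShift (word.toList.map pvIdx) s = pvF word s := by
  unfold pvAltShift pvF
  rw [List.map_map]
  rfl

lemma cts_aux (ks : List Char) (word : String) (acc : List String)
    (hks : ∀ k ∈ ks, k ∈ pvALPHABET) (h : ∀ c ∈ word.toList, c ∈ pvALPHABET) :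
    ks.foldl
      (fun cts key =>
        match cts with
        | none => none
        | some l =>
          match caesar_cipher word key with
          | none => none
          | some ct => some (l ++ [ct]))
      (some acc) =
      some (acc ++ ks.map (fun k => pvF word ((pvCHAR_TO_NUM.get? k).getD 0))) := by
  induction ks generalizing acc with
  | nil => simp
  | cons k t ih =>
    have hk : k ∈ pvALPHABET := hks k (by simp)
    simp only [List.foldl_cons, caesar_eq word k hk h]
    rw [ih (acc ++ [pvF word ((pvCHAR_TO_NUM.get? k).getD 0)]) (fun x hx => hks x (by simp [hx]))]
    simp

lemma cts_eq (word : String) (h : ∀ c ∈ word.toList, c ∈ pvALPHABET) :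
    pvALPHABET.foldl
      (fun cts key =>
        match cts with
        | none => none
        | some l =>
          match caesar_cipher word key with
          | none => none
          | some ct => some (l ++ [ct]))
      (some []) =
      some ((PySem.List.pyRange 0 27 1).map
        (fun shift => pvAltShift (word.toList.map pvIdx) shift)) := by
  rw [cts_aux pvALPHABET word [] (fun k hk => hk) h]
  have : pvALPHABET.map (fun k => pvF word ((pvCHAR_TO_NUM.get? k).getD 0)) =
      (PySem.List.pyRange 0 27 1).map (pvF word) := by
    rw [← shifts_eq, List.map_map]
    rfl
  simp only [List.nil_append, this]
  congr 1
  exact List.map_congr_left (fun s _ => (alt_shift_eq word s).symm)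

lemma batch_aux (ws : List String) (d : PySem.Dict String (List String))
    (h : ∀ w ∈ ws, ∀ c ∈ w.toList, c ∈ pvALPHABET) :
    ws.foldl
      (fun result word =>
        match result with
        | none => none
        | some d =>
          match pvALPHABET.foldl
            (fun cts key =>
              match cts with
              | none => none
              | some l =>
                match caesar_cipher word key with
                | none => none
                | some ct => some (l ++ [ct]))
            (some []) with
          | none => none
          | some ciphertexts => some (d.insert word ciphertexts))
      (some d) =
    ws.foldl
      (fun result word =>
        match result with
        | none => none
        | some d =>
          match pvAltNums word with
          | none => none
          | some nums =>
            some (d.insert word ((PySem.List.pyRange 0 27 1).map (fun shift => pvAltShift nums shift))))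
      (some d) := by
  induction ws generalizing d with
  | nil => rfl
  | cons w t ih =>
    have hw : ∀ c ∈ w.toList, c ∈ pvALPHABET := h w (by simp)
    simp only [List.foldl_cons, cts_eq w hw, alt_nums_eq w hw]
    exact ih _ (fun x hx => h x (by simp [hx]))

-- ===== VERDICT (by name: the statement is the Claim_ definition above) =====
theorem process_word_batch_spec : Claim_equal_process_word_batch := by
  intro wb _hdom hpre
  unfold Spec_process_word_batch process_word_batch process_word_batch_alt
  rw [batch_aux wb PySem.Dict.empty hpre]
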